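-- pv_equiv track=rewrite | github.com/ErManoj-Sharma/Practice_Programs | advent_of_code_2015/day 11/11.py | check_double_char
-- ===== SOURCE A (Python) =====
-- def check_double_char(s):
--     flag = False
--     l = len(s)
--     count = 0
--     ch = []
--     for i in range(0,l-1):
--         if s[i] == s[i+1]:
--             if s[i] not in ch:
--                 count += 1
--                 ch.append(s[i])
--     if count > 1:
--         flag = True
--     return flag
-- ===== SOURCE B (Python) =====
-- def check_double_char(s):
--     # Scan maximal runs of equal characters; collect the distinct characters
--     # that occur in a run of length >= 2, and ask for at least two of them.
--     doubled = set()
--     n = len(s)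
--     i = 0
--     while i < n:
--         j = i + 1
--         while j < n and s[j] == s[i]:
--             j += 1
--         if j - i >= 2:
--             doubled.add(s[i])
--         i = j
--     return len(doubled) >= 2
-- ===== Notes on version B (the rewrite author's own statement) =====
-- stated objective: alternative
-- what changed: B scans maximal runs of equal characters with a two-pointer while loop and collects into a set each character whose run has length >= 2, instead of A's index-pair comparison over range(l-1) with a membership-checked dedup list and counter.
import Mathlib
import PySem

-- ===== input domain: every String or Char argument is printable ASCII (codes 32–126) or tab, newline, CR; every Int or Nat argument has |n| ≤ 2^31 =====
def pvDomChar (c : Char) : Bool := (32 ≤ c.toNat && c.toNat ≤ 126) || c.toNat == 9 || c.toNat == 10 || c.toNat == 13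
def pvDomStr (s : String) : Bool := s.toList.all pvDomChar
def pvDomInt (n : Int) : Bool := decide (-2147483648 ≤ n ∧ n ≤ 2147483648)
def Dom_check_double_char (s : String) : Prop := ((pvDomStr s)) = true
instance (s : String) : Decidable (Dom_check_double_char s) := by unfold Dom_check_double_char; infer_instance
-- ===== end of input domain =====

-- B replaces A's index-pair scan with a dedup list by a run-length scan collecting a set of doubled characters (alternative decomposition; same result).


-- ===== PORT A =====
def check_double_char (s : String) : Bool :=
  let l : Int := PySem.Str.len s
  let res := (PySem.List.pyRange 0 (l - 1) 1).foldl
    (fun (st : Int × List Char) i =>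
      if PySem.List.pyGetD s.toList i ' ' = PySem.List.pyGetD s.toList (i + 1) ' ' then
        if PySem.List.pyGetD s.toList i ' ' ∈ st.2 then st
        else (st.1 + 1, st.2 ++ [PySem.List.pyGetD s.toList i ' '])
      else st)
    (0, [])
  decide (res.1 > 1)

-- ===== PORT B =====
-- B's outer while loop: strip the leading maximal run (inner while = takeWhile/dropWhile),
-- record the run's character in the set when the run length is ≥ 2.
def pvAltLoop : List Char → PySem.Set Char → PySem.Set Char
  | [], doubled => doubled
  | c :: t, doubled =>
    let run := t.takeWhile (fun x => x == c)
    let rest := t.dropWhile (fun x => x == c)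
    pvAltLoop rest (if 1 + run.length ≥ 2 then PySem.Set.add doubled c else doubled)
termination_by l => l.length
decreasing_by
  simpa using Nat.lt_succ_of_le (List.length_dropWhile_le _ _)


def check_double_char_alt (s : String) : Bool :=
  decide ((pvAltLoop s.toList PySem.Set.empty).length ≥ 2)

-- ===== PRECONDITION & SPEC =====
def Spec_check_double_char (s : String) (out : Bool) : Prop := out = check_double_char_alt s
instance (s : String) (out : Bool) : Decidable (Spec_check_double_char s out) := by unfold Spec_check_double_char; infer_instance

-- ===== CLAIM (what is proved, stated in full; the proofs are below) =====
def Claim_equal_check_double_char : Prop := ∀ (s : String), Dom_check_double_char s → Spec_check_double_char s (check_double_char s)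

-- ===== LEMMAS AND PROOFS =====

def pvDF : List Char → List Char
  | a :: b :: t => if a = b then a :: pvDF (b :: t) else pvDF (b :: t)
  | _ => []
def pvG (st : Int × List Char) (p : Char × Char) : Int × List Char :=
  if p.1 = p.2 then
    if p.1 ∈ st.2 then st else (st.1 + 1, st.2 ++ [p.1])
  else st

lemma pv_pairs_map (L : List Char) :
    (PySem.List.pyRange 0 ((L.length : Int) - 1) 1).map
      (fun i => (PySem.List.pyGetD L i ' ', PySem.List.pyGetD L (i + 1) ' '))
    = L.zip L.tail := by
  apply List.ext_getElem
  · simp [PySem.List.length_pyRange_one]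
  · intro i h1 h2
    simp only [List.getElem_map, PySem.List.getElem_pyRange_one, List.getElem_zip]
    simp [PySem.List.length_pyRange_one] at h1
    have hi : i < L.length - 1 := by omega
    rw [show ((0:Int) + (i:Int)) = ((i:Nat) : Int) by omega]
    rw [show ((i:Int) + 1) = (((i+1:Nat)) : Int) by push_cast; ring]
    rw [PySem.List.pyGetD_natCast, PySem.List.pyGetD_natCast]
    rw [List.getD_eq_getElem _ _ (by omega), List.getD_eq_getElem _ _ (by omega)]
    simp [List.getElem_tail]

lemma pv_zip_fold_eq (L : List Char) : ∀ st : Int × List Char,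
    ((L.zip L.tail).foldl pvG st).2 = (pvDF L).foldl PySem.Set.add st.2 := by
  induction L with
  | nil => intro st; rfl
  | cons a t ih =>
    intro st
    cases t with
    | nil => rfl
    | cons b t' =>
      show (List.foldl pvG st ((a,b) :: ((b::t').zip t'))).2 = _
      have hih := ih (pvG st (a,b))
      simp only [List.tail_cons] at hih
      by_cases h : a = b
      · rw [List.foldl_cons, hih]
        simp [pvDF, pvG, h, PySem.Set.add_eq_ite]
        split <;> simp
      · rw [List.foldl_cons, hih]
        simp [pvDF, pvG, h]

lemma pv_fold_inv (P : List (Char × Char)) : ∀ st : Int × List Char,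
    (P.foldl pvG st).1 - ((P.foldl pvG st).2.length : Int) = st.1 - st.2.length := by
  induction P with
  | nil => intro st; rfl
  | cons p P' ih =>
    intro st
    rw [List.foldl_cons, ih]
    unfold pvG
    split_ifs <;> simp

lemma pv_DF_run (t : List Char) (c : Char) :
    pvDF (c :: t) = List.replicate (t.takeWhile (fun x => x == c)).length c
      ++ pvDF (t.dropWhile (fun x => x == c)) := by
  induction t with
  | nil => simp [pvDF]
  | cons b t' ih =>
    by_cases h : b = c
    · subst h
      simp only [List.takeWhile_cons, List.dropWhile_cons, beq_self_eq_true, if_true]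
      show pvDF (b :: b :: t') = _
      rw [show pvDF (b :: b :: t') = b :: pvDF (b :: t') by simp [pvDF]]
      rw [ih]
      simp [List.replicate_succ]
    · have hb : (b == c) = false := by simp [h]
      simp only [List.takeWhile_cons, List.dropWhile_cons, hb]
      show pvDF (c :: b :: t') = _
      rw [show pvDF (c :: b :: t') = pvDF (b :: t') by simp [pvDF, Ne.symm h]]
      simp

lemma pv_fold_replicate (n : Nat) (c : Char) (acc : PySem.Set Char) :
    (List.replicate n c).foldl PySem.Set.add acc
      = if n = 0 then acc else PySem.Set.add acc c := by
  induction n generalizing acc with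
  | zero => rfl
  | succ m ih =>
    rw [List.replicate_succ, List.foldl_cons, ih]
    have h2 : PySem.Set.add (PySem.Set.add acc c) c = PySem.Set.add acc c :=
      PySem.Set.add_of_mem (by simp [PySem.Set.mem_add])
    rw [h2]
    simp


lemma pv_altLoop_eq : ∀ (L : List Char) (acc : PySem.Set Char),
    pvAltLoop L acc = (pvDF L).foldl PySem.Set.add acc
  | [], acc => by rw [pvAltLoop]; rfl
  | c :: t, acc => by
    rw [pvAltLoop, pv_altLoop_eq (t.dropWhile (fun x => x == c)),
        pv_DF_run, List.foldl_append, pv_fold_replicate]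
    congr 1
    split_ifs <;> first | rfl | omega
termination_by L _ => L.length
decreasing_by
  simpa using Nat.lt_succ_of_le (List.length_dropWhile_le _ _)


-- ===== VERDICT (by name: the statement is the Claim_ definition above) =====
theorem check_double_char_spec : Claim_equal_check_double_char := by
  intro s _
  show check_double_char s = check_double_char_alt s
  simp only [check_double_char, check_double_char_alt]
  rw [decide_eq_decide]
  have hlen : PySem.Str.len s = ((s.toList.length : Int)) := by simp [pysem]
  rw [hlen]
  have hfold : (PySem.List.pyRange 0 ((s.toList.length : Int) - 1) 1).foldl
      (fun (st : Int × List Char) i =>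
        if PySem.List.pyGetD s.toList i ' ' = PySem.List.pyGetD s.toList (i + 1) ' ' then
          if PySem.List.pyGetD s.toList i ' ' ∈ st.2 then st
          else (st.1 + 1, st.2 ++ [PySem.List.pyGetD s.toList i ' '])
        else st) ((0 : Int), ([] : List Char))
      = (s.toList.zip s.toList.tail).foldl pvG ((0 : Int), ([] : List Char)) := by
    rw [← pv_pairs_map s.toList, List.foldl_map]
    simp [pvG]
  have h3' := pv_altLoop_eq s.toList PySem.Set.empty
  rw [hfold, h3']
  have h1 := pv_fold_inv (s.toList.zip s.toList.tail) ((0 : Int), ([] : List Char))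
  have h2 := pv_zip_fold_eq s.toList ((0 : Int), ([] : List Char))
  simp only [List.length_nil, Nat.cast_zero, sub_zero] at h1
  have hset : PySem.Set.empty = ([] : List Char) := rfl
  rw [hset] at *
  rw [← h2]
  omega
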